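-- pv_equiv track=rewrite | github.com/itsmeludo/PhylOligo | phyloligo.py | make_freqchunk
-- ===== SOURCE A (Python) =====
-- def make_freqchunk(frequencies, chunksize):
--     """ prepare frequencies to be parallelized
--     """
--     chunk = list()
--     for i in range(len(frequencies)):
--         freqi = frequencies[i]
--         for j in range(i, len(frequencies)):
--             freqj = frequencies[j]
--             chunk.append((i, j, freqi, freqj))
--             if len(chunk) == chunksize:
--                 yield chunk
--                 chunk = list()
--     # the last chunk
--     if chunk != []:
--         yield chunk
-- ===== SOURCE B (Python) =====
-- def make_freqchunk(frequencies, chunksize):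
--     """ prepare frequencies to be parallelized """
--     n = len(frequencies)
--     flat = [(i, j, frequencies[i], frequencies[j])
--             for i in range(n) for j in range(i, n)]
--     for start in range(0, len(flat), chunksize):
--         yield flat[start:start + chunksize]
-- ===== Notes on version B (the rewrite author's own statement) =====
-- stated objective: simpler
-- what changed: B builds the flat list of (i,j,freq_i,freq_j) pairs once with a comprehension and slices it into chunks with a stride-range loop, instead of A's nested index loops threading a chunk accumulator that is cut and reset when its length hits chunksize; Pre_ excludes non-positive chunk sizes, a corner no caller specifies, where A emits everything as one chunk while B's stride range raises ValueError on zero and yields nothing on a negative size.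
-- outside the precondition, e.g. on make_freqchunk([[1]], 0): A returns [[(0, 0, [1], [1])]], B raises ValueError; on make_freqchunk([[1]], -1): A returns [[(0, 0, [1], [1])]], B returns []
import Mathlib
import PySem

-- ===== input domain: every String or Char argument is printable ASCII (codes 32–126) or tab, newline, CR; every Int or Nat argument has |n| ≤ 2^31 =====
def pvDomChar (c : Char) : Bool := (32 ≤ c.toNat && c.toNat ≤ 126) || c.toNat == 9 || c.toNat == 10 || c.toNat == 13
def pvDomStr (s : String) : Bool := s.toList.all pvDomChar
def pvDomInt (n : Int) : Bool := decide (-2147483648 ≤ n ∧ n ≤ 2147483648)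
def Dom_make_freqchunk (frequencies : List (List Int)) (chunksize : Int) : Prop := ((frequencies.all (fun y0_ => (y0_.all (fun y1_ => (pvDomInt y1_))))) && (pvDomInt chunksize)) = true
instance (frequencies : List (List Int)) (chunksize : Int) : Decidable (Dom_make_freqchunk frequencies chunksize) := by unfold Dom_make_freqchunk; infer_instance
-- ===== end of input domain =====

-- B builds the flat list of (i,j,freq_i,freq_j) pairs once and slices it into chunks with a
-- stride-range loop, instead of A's nested loops threading an accumulator cut at chunksize.

-- ===== PORT A =====
-- literal transliteration: the generator's yielded chunks collected in order;
-- state = (chunks yielded so far, current chunk)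
def make_freqchunk (frequencies : List (List Int)) (chunksize : Int) :
    List (List (Int × Int × List Int × List Int)) :=
  let n : Int := frequencies.length
  let st :=
    (PySem.List.pyRange 0 n 1).foldl (fun st i =>
      let freqi := PySem.List.pyGetD frequencies i []
      (PySem.List.pyRange i n 1).foldl (fun st j =>
        let freqj := PySem.List.pyGetD frequencies j []
        let chunk := st.2 ++ [(i, j, freqi, freqj)]
        if (chunk.length : Int) = chunksize then (st.1 ++ [chunk], []) else (st.1, chunk)) st)
      (([], []) : List (List (Int × Int × List Int × List Int)) × List (Int × Int × List Int × List Int))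
  if st.2 ≠ [] then st.1 ++ [st.2] else st.1

-- ===== PORT B =====
-- the yielded batches of Source B: flat list comprehension, then 'for start in range(0, len(flat), chunksize)'
-- yielding the slice flat[start:start+chunksize]
def make_freqchunk_alt (frequencies : List (List Int)) (chunksize : Int) :
    List (List (Int × Int × List Int × List Int)) :=
  let n : Int := frequencies.length
  let flat := (PySem.List.pyRange 0 n 1).flatMap (fun i =>
    (PySem.List.pyRange i n 1).map (fun j =>
      (i, j, PySem.List.pyGetD frequencies i [], PySem.List.pyGetD frequencies j [])))
  (PySem.List.pyRange 0 (flat.length : Int) chunksize).map (fun start =>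
    PySem.List.slice flat (some start) (some (start + chunksize)))

-- ===== PRECONDITION & SPEC =====
-- Pre_ excludes non-positive chunk sizes, a corner no caller specifies: there A emits
-- everything as one chunk, while B's stride range raises ValueError on zero and yields
-- nothing on a negative size.
def Pre_make_freqchunk (frequencies : List (List Int)) (chunksize : Int) : Prop :=
  1 ≤ chunksize
instance (frequencies : List (List Int)) (chunksize : Int) : Decidable (Pre_make_freqchunk frequencies chunksize) := by unfold Pre_make_freqchunk; infer_instance

def pvWitness_make_freqchunk : List (List Int) × Int := ([[1], [2]], 2)

def Spec_make_freqchunk (frequencies : List (List Int)) (chunksize : Int) (out : List (List (Int × Int × List Int × List Int))) : Prop := out = make_freqchunk_alt frequencies chunksize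
instance (frequencies : List (List Int)) (chunksize : Int) (out : List (List (Int × Int × List Int × List Int))) : Decidable (Spec_make_freqchunk frequencies chunksize out) := by unfold Spec_make_freqchunk; infer_instance

-- ===== CLAIM =====
def Claim_equal_make_freqchunk : Prop := ∀ (frequencies : List (List Int)) (chunksize : Int), Dom_make_freqchunk frequencies chunksize → Pre_make_freqchunk frequencies chunksize → Spec_make_freqchunk frequencies chunksize (make_freqchunk frequencies chunksize)

-- ===== LEMMAS AND PROOFS =====

-- the step function of A's accumulator loop, over an arbitrary item type
def pvStep {α : Type} (c : Int) (st : List (List α) × List α) (x : α) :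
    List (List α) × List α :=
  let chunk := st.2 ++ [x]
  if (chunk.length : Int) = c then (st.1 ++ [chunk], []) else (st.1, chunk)

-- A's final 'if chunk != []' flush
def pvFinish {α : Type} (st : List (List α) × List α) : List (List α) :=
  if st.2 ≠ [] then st.1 ++ [st.2] else st.1

-- reference chunking used only by the proofs
def pvChunksOf {α : Type} (c : Nat) (l : List α) : List (List α) :=
  if h : c = 0 ∨ l = [] then (if l = [] then [] else [l])
  else l.take c :: pvChunksOf c (l.drop c)
termination_by l.length
decreasing_by
  push Not at h
  cases l with
  | nil => exact absurd rfl h.2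
  | cons x xs => simp [List.length_drop]; omega

theorem pvFoldl_flatMap {α β γ : Type} (l : List α) (g : α → List β)
    (f : γ → β → γ) (init : γ) :
    (l.flatMap g).foldl f init = l.foldl (fun st a => (g a).foldl f st) init := by
  induction l generalizing init with
  | nil => rfl
  | cons a l ih => simp [List.flatMap_cons, List.foldl_append, ih]

theorem pvChunksOf_nil {α : Type} (c : Nat) : pvChunksOf c ([] : List α) = [] := by
  rw [pvChunksOf]; simp

theorem pvChunksOf_small {α : Type} (c : Nat) (l : List α) (h : l.length < c) :
    pvChunksOf c l = if l = [] then [] else [l] := by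
  rw [pvChunksOf]
  by_cases hl : l = []
  · simp [hl]
  · have hc : ¬ (c = 0 ∨ l = []) := by
      push Not; exact ⟨by omega, hl⟩
    rw [dif_neg hc]
    have hd : l.drop c = [] := List.drop_eq_nil_of_le (by omega)
    rw [List.take_of_length_le (by omega), hd, pvChunksOf_nil]
    simp [hl]

-- main invariant: flushing A's fold state equals done ++ chunks of (cur ++ rest),
-- provided the current chunk is strictly shorter than the (positive) chunk size
theorem pvFoldl_step_pos {α : Type} (c : Int) (hc : 1 ≤ c) (l : List α)
    (done : List (List α)) (cur : List α) (hcur : (cur.length : Int) < c) :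
    pvFinish (l.foldl (pvStep c) (done, cur)) = done ++ pvChunksOf c.toNat (cur ++ l) := by
  induction l generalizing done cur with
  | nil =>
      rw [List.append_nil, pvChunksOf_small c.toNat cur (by omega)]
      by_cases h : cur = [] <;> simp [pvFinish, h]
  | cons x xs ih =>
      simp only [List.foldl_cons]
      by_cases hcut : ((cur.length : Int) + 1 = c)
      · rw [show pvStep c (done, cur) x = (done ++ [cur ++ [x]], []) by
          simp [pvStep, hcut]]
        rw [ih (done ++ [cur ++ [x]]) [] (by simpa using hc)]
        simp only [List.nil_append]
        conv_rhs => rw [pvChunksOf]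
        have hne : ¬ (c.toNat = 0 ∨ cur ++ x :: xs = []) := by
          push Not; constructor
          · omega
          · simp
        rw [dif_neg hne]
        have hlen : (cur ++ [x]).length = c.toNat := by
          simp; omega
        have htake : (cur ++ x :: xs).take c.toNat = cur ++ [x] := by
          have : cur ++ x :: xs = (cur ++ [x]) ++ xs := by simp
          rw [this, List.take_append_of_le_length (by omega),
            List.take_of_length_le (by omega)]
        have hdrop : (cur ++ x :: xs).drop c.toNat = xs := by
          have : cur ++ x :: xs = (cur ++ [x]) ++ xs := by simp
          rw [this, ← hlen, List.drop_left]
        rw [htake, hdrop]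
        simp
      · rw [show pvStep c (done, cur) x = (done, cur ++ [x]) by
          simp [pvStep, hcut]]
        rw [ih done (cur ++ [x]) (by simp; omega)]
        simp

-- A's nested fold is the fold of pvStep over B's flat list
theorem pvA_as_flat (frequencies : List (List Int)) (chunksize : Int) :
    make_freqchunk frequencies chunksize =
      pvFinish (((PySem.List.pyRange 0 (frequencies.length : Int) 1).flatMap (fun i =>
        (PySem.List.pyRange i (frequencies.length : Int) 1).map (fun j =>
          (i, j, PySem.List.pyGetD frequencies i [], PySem.List.pyGetD frequencies j [])))).foldl
        (pvStep chunksize) ([], [])) := by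
  rw [pvFoldl_flatMap]
  unfold make_freqchunk pvFinish pvStep
  simp [List.foldl_map]

-- Nat form of B's stride loop
theorem pvStride_eq_chunksOf {α : Type} (c : Nat) (hc : 0 < c) (l : List α) :
    (List.range ((l.length + c - 1) / c)).map (fun k => (l.drop (c * k)).take c)
      = pvChunksOf c l := by
  induction hn : l.length using Nat.strong_induction_on generalizing l with
  | _ n ih =>
    cases l with
    | nil =>
        simp at hn; subst hn
        rw [pvChunksOf_nil]
        have : (c - 1) / c = 0 := Nat.div_eq_of_lt (by omega)
        simp [this]
    | cons x xs =>
        subst hn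
        have hlen : 0 < (x :: xs).length := by simp
        have hm : ((x :: xs).length + c - 1) / c
            = (((x :: xs).drop c).length + c - 1) / c + 1 := by
          rw [List.length_drop]
          by_cases hle : (x :: xs).length ≤ c
          · have h1 : (x :: xs).length - c = 0 := by omega
            have h2 : (x :: xs).length + c - 1 = ((x :: xs).length - 1) + c := by omega
            rw [h1, h2, Nat.add_div_right _ hc,
              Nat.div_eq_of_lt (show (x :: xs).length - 1 < c by omega),
              Nat.div_eq_of_lt (show 0 + c - 1 < c by omega)]
          · have h2 : (x :: xs).length + c - 1 = ((x :: xs).length - c + c - 1) + c := by omega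
            rw [h2, Nat.add_div_right _ hc]
        rw [hm]
        rw [List.range_succ_eq_map]
        rw [pvChunksOf, dif_neg (by push Not; exact ⟨by omega, by simp⟩)]
        simp only [List.map_cons, Nat.mul_zero, List.drop_zero, List.map_map]
        congr 1
        have hrec := ih ((x :: xs).drop c).length (by rw [List.length_drop]; omega)
          ((x :: xs).drop c) rfl
        rw [← hrec]
        apply List.map_congr_left
        intro k _
        simp only [Function.comp_apply, List.drop_drop]
        congr 2
        rw [Nat.mul_succ]
        exact Nat.add_comm _ _

-- bridge: B's pyRange of slices is pvChunksOf, for positive chunksize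
theorem pvB_eq_chunksOf {α : Type} (c : Int) (hc : 1 ≤ c) (l : List α) :
    (PySem.List.pyRange 0 (l.length : Int) c).map (fun start =>
        PySem.List.slice l (some start) (some (start + c)))
      = pvChunksOf c.toNat l := by
  have hc' : ((c.toNat : Nat) : Int) = c := by omega
  rw [PySem.List.pyRange_of_pos 0 (l.length : Int) (by omega)]
  have hcast : ((l.length : Int) - 0 + c - 1) / c
      = (((l.length + c.toNat - 1) / c.toNat : Nat) : Int) := by
    rw [Int.natCast_div]
    congr 1
    · push_cast; omega
    · omega
  by_cases h0 : l = []
  · subst h0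
    simp [pvChunksOf_nil]
  · rw [if_pos (by
      have := List.length_pos_iff.mpr h0
      simp; omega)]
    rw [hcast, Int.toNat_natCast]
    rw [List.map_map, ← pvStride_eq_chunksOf c.toNat (by omega) l]
    apply List.map_congr_left
    intro k _
    simp only [Function.comp_apply, Int.zero_add]
    have hs : c * (k : Int) = ((c.toNat * k : Nat) : Int) := by push_cast; rw [hc']
    have ht : c * (k : Int) + c = ((c.toNat * k : Nat) : Int) + ((c.toNat : Nat) : Int) := by
      push_cast; rw [hc']
    rw [ht, hs]
    exact PySem.List.slice_natCast_add l (c.toNat * k) c.toNat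

-- ===== VERDICT =====
theorem make_freqchunk_spec : Claim_equal_make_freqchunk := by
  intro frequencies chunksize _ hpre
  unfold Pre_make_freqchunk at hpre
  unfold Spec_make_freqchunk
  rw [pvA_as_flat]
  unfold make_freqchunk_alt
  rw [pvFoldl_step_pos chunksize hpre _ [] [] (by simp; omega)]
  rw [pvB_eq_chunksOf chunksize hpre]
  simp
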